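-- pv_equiv track=rewrite | github.com/SeungrokYoon/programmers | 20210310_time_complexity_pie.py | solution
-- ===== SOURCE A (Python) =====
-- import math
--
-- def solution (customers):
--
--     largest=[math.inf]
--     for i in range(3):
--         maxNum=largest[i]
--         starting = 0
--         for pie in customers:
--             if (pie < maxNum) and (starting <= pie):
--                 starting = pie
--         largest.append(starting)
--     return largest[1:]
-- ===== SOURCE B (Python) =====
-- def solution(customers):
--     top = sorted({p for p in customers if p >= 0}, reverse=True)[:3]
--     return top + [0] * (3 - len(top))
-- ===== Notes on version B (the rewrite author's own statement) =====
-- stated objective: simpler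
-- what changed: Replaces A's three floor-constrained full scans of the list with one dedup of the nonnegative values, a descending sort, a 3-element slice and zero padding.
import Mathlib
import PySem

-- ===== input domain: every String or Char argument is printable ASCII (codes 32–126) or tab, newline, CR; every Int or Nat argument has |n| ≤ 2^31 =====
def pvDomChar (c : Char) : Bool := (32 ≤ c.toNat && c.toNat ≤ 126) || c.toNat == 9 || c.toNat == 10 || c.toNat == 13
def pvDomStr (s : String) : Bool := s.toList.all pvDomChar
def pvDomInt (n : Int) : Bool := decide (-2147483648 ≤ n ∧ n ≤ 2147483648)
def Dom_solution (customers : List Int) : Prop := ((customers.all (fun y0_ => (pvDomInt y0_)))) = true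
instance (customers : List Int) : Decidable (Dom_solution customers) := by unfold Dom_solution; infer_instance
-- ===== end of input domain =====

-- B replaces A's three floor-constrained full scans by one dedup + descending sort + slice + zero padding (simpler).


-- ===== PORT A =====
-- math.inf is modelled as 'none' in 'Option Int': 'pie < math.inf' is always true, which pvLt mirrors
-- (exact here: only 'largest[0]' is the float inf, it is never returned — the slice largest[1:] holds ints only,
-- so the final '.map (·.getD 0)' only strips the 'some' wrapper of appended ints, the default 0 is never used).
def pvLt (p : Int) (m : Option Int) : Bool :=
  match m with
  | none => true
  | some v => decide (p < v)

def solution (customers : List Int) : List Int :=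
  let largest : List (Option Int) :=
    (PySem.List.pyRange 0 3 1).foldl (fun largest i =>
      let maxNum := PySem.List.pyGetD largest i none
      let starting : Int :=
        customers.foldl (fun starting pie =>
          if pvLt pie maxNum && decide (starting ≤ pie) then pie else starting) 0
      largest ++ [some starting]) [none]
  (PySem.List.slice largest (some 1) none).map (fun o => o.getD 0)

-- ===== PORT B =====
def solution_alt (customers : List Int) : List Int :=
  let top := (PySem.List.sorted (PySem.Set.ofList (customers.filter (fun p => decide (0 ≤ p))))
      (fun x => x) true).take 3
  top ++ List.replicate (3 - top.length) 0

-- ===== PRECONDITION & SPEC =====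
def Spec_solution (customers : List Int) (out : List Int) : Prop := out = solution_alt customers
instance (customers : List Int) (out : List Int) : Decidable (Spec_solution customers out) := by unfold Spec_solution; infer_instance

-- ===== CLAIM (what is proved, stated in full; the proofs are below) =====
def Claim_equal_solution : Prop := ∀ (customers : List Int), Dom_solution customers → Spec_solution customers (solution customers)

-- ===== LEMMAS AND PROOFS =====

-- A's inner scan, i.e. the running max of the elements strictly below the bound m (0-based).
def pvScan (customers : List Int) (m : Option Int) : Int :=
  customers.foldl (fun starting pie =>
    if pvLt pie m && decide (starting ≤ pie) then pie else starting) 0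

theorem pvScan_eq_filter_max (xs : List Int) (m : Option Int) (s : Int) :
    xs.foldl (fun starting pie =>
      if pvLt pie m && decide (starting ≤ pie) then pie else starting) s
    = (xs.filter (fun p => pvLt p m)).foldl max s := by
  induction xs generalizing s with
  | nil => rfl
  | cons p t ih =>
    by_cases hp : pvLt p m
    · simp only [List.foldl_cons, List.filter_cons, hp, if_pos]
      by_cases h : s ≤ p
      · rw [if_pos (by simp [h]), max_eq_right h, ih]
      · rw [if_neg (by simp; omega), max_eq_left (by omega), ih]
    · simp only [List.foldl_cons, List.filter_cons, hp, if_neg, Bool.false_and,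
        Bool.false_eq_true, not_false_eq_true]
      exact ih s

theorem solution_eq_scans (xs : List Int) :
    solution xs = [pvScan xs none, pvScan xs (some (pvScan xs none)),
      pvScan xs (some (pvScan xs (some (pvScan xs none))))] := by
  rfl

theorem foldl_max_le (l : List Int) (a b : Int) (ha : a ≤ b) (h : ∀ x ∈ l, x ≤ b) :
    l.foldl max a ≤ b := by
  induction l generalizing a with
  | nil => exact ha
  | cons x t ih =>
    exact ih (max a x) (max_le ha (h x (by simp))) (fun y hy => h y (by simp [hy]))

theorem pvScan_eq_headD (xs : List Int) (m : Option Int) (T : List Int)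
    (hmem : ∀ x ∈ xs, ((0 ≤ x ∧ pvLt x m = true) ↔ x ∈ T))
    (hT : ∀ x ∈ T, x ∈ xs ∧ 0 ≤ x)
    (hhead : ∀ h t, T = h :: t → ∀ x ∈ T, x ≤ h) :
    pvScan xs m = T.headD 0 := by
  unfold pvScan
  rw [pvScan_eq_filter_max]
  rcases hTc : T with _ | ⟨h, t⟩
  · -- T empty: every filtered element is negative, the fold stays at 0
    simp only [List.headD_nil]
    apply le_antisymm
    · apply foldl_max_le _ _ _ le_rfl
      intro x hx
      rw [List.mem_filter] at hx
      by_contra hneg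
      have := (hmem x hx.1).mp ⟨by omega, hx.2⟩
      simp [hTc] at this
    · exact (PySem.List.le_foldl_max _ _).1
  · simp only [List.headD_cons]
    have hhT : h ∈ T := by simp [hTc]
    obtain ⟨hhx, hh0⟩ := hT h hhT
    have hhf : h ∈ xs.filter (fun p => pvLt p m) := by
      rw [List.mem_filter]
      exact ⟨hhx, ((hmem h hhx).mpr hhT).2⟩
    apply le_antisymm
    · apply foldl_max_le _ _ _ hh0
      intro x hx
      rw [List.mem_filter] at hx
      by_cases hx0 : 0 ≤ x
      · exact hhead h t hTc x ((hmem x hx.1).mp ⟨hx0, hx.2⟩)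
      · omega
    · exact (PySem.List.le_foldl_max _ _).2 h hhf

theorem pvHead_ub (T : List Int) (hdesc : T.Pairwise (fun a b => b < a)) :
    ∀ h t, T = h :: t → ∀ x ∈ T, x ≤ h := by
  rintro h t rfl x hx
  rcases List.mem_cons.mp hx with rfl | hx
  · exact le_rfl
  · exact ((List.pairwise_cons.mp hdesc).1 x hx).le

theorem pvStep (xs : List Int) (m : Option Int) (T : List Int)
    (hmem : ∀ x ∈ xs, ((0 ≤ x ∧ pvLt x m = true) ↔ x ∈ T))
    (hT : ∀ x ∈ T, x ∈ xs ∧ 0 ≤ x)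
    (hdesc : T.Pairwise (fun a b => b < a)) :
    (∀ x ∈ xs, ((0 ≤ x ∧ pvLt x (some (T.headD 0)) = true) ↔ x ∈ T.tail)) ∧
    (∀ x ∈ T.tail, x ∈ xs ∧ 0 ≤ x) ∧
    T.tail.Pairwise (fun a b => b < a) := by
  rcases T with _ | ⟨h, t⟩
  · refine ⟨?_, by simp, by simp⟩
    intro x _
    simp only [pvLt, List.headD_nil, decide_eq_true_eq, List.tail_nil, List.not_mem_nil,
      iff_false, not_and]
    omega
  · obtain ⟨hpair, hdt⟩ := List.pairwise_cons.mp hdesc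
    refine ⟨?_, fun x hx => hT x (List.mem_cons_of_mem h hx), hdt⟩
    intro x hxs
    simp only [pvLt, List.headD_cons, decide_eq_true_eq, List.tail_cons]
    constructor
    · rintro ⟨hx0, hxh⟩
      have hxm : pvLt x m = true := by
        have hhm : pvLt h m = true := ((hmem h (hT h (by simp)).1).mpr (by simp)).2
        rcases m with _ | v
        · rfl
        · simp only [pvLt, decide_eq_true_eq] at hhm ⊢
          omega
      have hxT : x ∈ h :: t := (hmem x hxs).mp ⟨hx0, hxm⟩
      rcases List.mem_cons.mp hxT with rfl | hxt
      · omega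
      · exact hxt
    · intro hxt
      have hxT : x ∈ h :: t := List.mem_cons_of_mem h hxt
      exact ⟨(hT x hxT).2, hpair x hxt⟩

theorem pvTakePad (L : List Int) :
    [L.headD 0, L.tail.headD 0, L.tail.tail.headD 0]
      = L.take 3 ++ List.replicate (3 - (L.take 3).length) 0 := by
  rcases L with _ | ⟨a, _ | ⟨b, _ | ⟨c, t⟩⟩⟩ <;> simp [List.replicate]

theorem solution_eq_alt (xs : List Int) : solution xs = solution_alt xs := by
  unfold solution_alt
  rw [solution_eq_scans]
  set L := PySem.List.sorted (PySem.Set.ofList (xs.filter (fun p => decide (0 ≤ p))))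
      (fun x => x) true with hLdef
  have hmemL : ∀ x, x ∈ L ↔ (x ∈ xs ∧ 0 ≤ x) := by
    intro x
    rw [hLdef, PySem.List.mem_sorted, PySem.Set.mem_ofList, List.mem_filter]
    simp
  have hnd : L.Nodup :=
    (PySem.List.sorted_perm _ _ _).symm.nodup (PySem.Set.nodup_ofList _)
  have hdesc : L.Pairwise (fun a b => b < a) := by
    have h1 : L.Pairwise (fun a b => b ≤ a) := PySem.List.sorted_pairwise_rev _ _
    exact (h1.and hnd).imp (fun h => lt_of_le_of_ne h.1 (Ne.symm h.2))
  have h0mem : ∀ x ∈ xs, ((0 ≤ x ∧ pvLt x none = true) ↔ x ∈ L) := by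
    intro x hx
    simp [pvLt, hmemL, hx]
  have h0T : ∀ x ∈ L, x ∈ xs ∧ 0 ≤ x := fun x hx => (hmemL x).mp hx
  obtain ⟨h1mem, h1T, h1desc⟩ := pvStep xs none L h0mem h0T hdesc
  obtain ⟨h2mem, h2T, h2desc⟩ := pvStep xs (some (L.headD 0)) L.tail h1mem h1T h1desc
  have e0 : pvScan xs none = L.headD 0 :=
    pvScan_eq_headD xs none L h0mem h0T (pvHead_ub L hdesc)
  have e1 : pvScan xs (some (L.headD 0)) = L.tail.headD 0 :=
    pvScan_eq_headD xs _ L.tail h1mem h1T (pvHead_ub L.tail h1desc)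
  have e2 : pvScan xs (some (L.tail.headD 0)) = L.tail.tail.headD 0 :=
    pvScan_eq_headD xs _ L.tail.tail h2mem h2T (pvHead_ub L.tail.tail h2desc)
  rw [e0, e1, e2, pvTakePad]

-- ===== VERDICT (by name: the statement is the Claim_ definition above) =====
theorem solution_spec : Claim_equal_solution := by
  intro xs _
  exact solution_eq_alt xs
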